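-- pv_equiv track=rewrite | github.com/fan1018wen/Packages | FactorLib/utils/datetime_func.py | getMonthLastDay
-- ===== SOURCE A (Python) =====
-- def getMonthLastDay(dates, step=1):
--     dates.sort()
--     MonthLastDay = []
--     MonthLastDay.append(dates[0])
--     s = 0
--     for iDate in dates:
--         if (iDate[:6]==MonthLastDay[-1][:6]):
--             MonthLastDay[-1] = iDate
--         else:
--             s += 1
--             if s >= step:
--                 MonthLastDay.append(iDate)
--                 s = 0
--             else:
--                 MonthLastDay[-1] = iDate
--     return MonthLastDay
-- ===== SOURCE B (Python) =====
-- def getMonthLastDay(dates, step=1):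
--     # NOTE: sorts `dates` in place, like the original.
--     dates.sort()
--     # pass 1: month-last-day table -- keep each date whose successor opens a new month
--     M = [d for d, nxt in zip(dates, dates[1:]) if nxt[:6] != d[:6]] + dates[-1:]
--     # pass 2: step selection over the month table (IndexError on empty input, like the original)
--     result = [M[0]]
--     s = 0
--     for m in M[1:]:
--         s += 1
--         if s >= step:
--             result.append(m)
--             s = 0
--         else:
--             result[-1] = m
--     return result
-- ===== Notes on version B (the rewrite author's own statement) =====
-- stated objective: alternative
-- what changed: A's single fused stateful scan is split into a pipeline: a zip-based successor filter first extracts the last day of each month, then a separate pass runs the step selection over that month table.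
import Mathlib
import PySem

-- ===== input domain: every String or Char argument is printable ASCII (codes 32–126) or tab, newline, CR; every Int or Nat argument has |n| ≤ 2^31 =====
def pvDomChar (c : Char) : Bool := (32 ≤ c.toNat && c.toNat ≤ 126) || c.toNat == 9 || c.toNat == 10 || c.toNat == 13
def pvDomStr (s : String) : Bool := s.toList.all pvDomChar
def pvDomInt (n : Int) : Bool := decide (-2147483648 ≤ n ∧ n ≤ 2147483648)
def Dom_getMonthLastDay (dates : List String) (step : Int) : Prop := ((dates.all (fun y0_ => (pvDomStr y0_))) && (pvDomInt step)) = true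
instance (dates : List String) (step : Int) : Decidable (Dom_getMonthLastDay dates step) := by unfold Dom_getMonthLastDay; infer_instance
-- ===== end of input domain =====

-- B replaces A's single fused stateful scan by a group-then-select pipeline (month-last table via a
-- successor filter, then the step selection over it); same cost, no speed claim.
-- Both Pythons sort `dates` in place; the equivalence proved here is about the return value.

-- d[:6], the month key (shared by both ports)
def pvMonth (d : String) : String := PySem.Str.slice d none (some 6)

-- ===== PORT A =====
-- loop body of A: same month -> overwrite last; else bump s, append when s >= step else overwrite
def pvStepA (step : Int) (st : List String × Int) (iDate : String) : List String × Int :=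
  if pvMonth iDate == pvMonth (st.1.getLastD "") then   -- MonthLastDay[-1]; the list is never empty here
    (st.1.dropLast ++ [iDate], st.2)                    -- MonthLastDay[-1] = iDate
  else if st.2 + 1 ≥ step then (st.1 ++ [iDate], 0)     -- s += 1; append, s = 0
  else (st.1.dropLast ++ [iDate], st.2 + 1)             -- MonthLastDay[-1] = iDate

def getMonthLastDay (dates : List String) (step : Int) : List String :=
  let ds := PySem.List.sorted dates (fun x => x) false
  match PySem.List.pyGet? ds 0 with
  | none => []                                          -- dates[0]: IndexError, excluded by Pre_
  | some d0 => (ds.foldl (pvStepA step) ([d0], 0)).1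

-- ===== PORT B =====
-- B's month table: M = [d for d, nxt in zip(ds, ds[1:]) if nxt[:6] != d[:6]] + ds[-1:]
def pvZipM (ds : List String) : List String :=
  ((ds.zip (PySem.List.slice ds (some 1) none)).filter
      (fun p => pvMonth p.2 != pvMonth p.1)).map Prod.fst
    ++ PySem.List.slice ds (some (-1)) none

-- loop body of B's second pass (the step selection over the month table)
def pvSelStep (step : Int) (st : List String × Int) (m : String) : List String × Int :=
  if st.2 + 1 ≥ step then (st.1 ++ [m], 0)              -- s += 1; append, s = 0
  else (st.1.dropLast ++ [m], st.2 + 1)                 -- result[-1] = m; result is never empty here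

def getMonthLastDay_alt (dates : List String) (step : Int) : List String :=
  let ds := PySem.List.sorted dates (fun x => x) false
  let M := pvZipM ds
  match PySem.List.pyGet? M 0 with
  | none => []                                          -- M[0]: IndexError, excluded by Pre_
  | some m0 => ((PySem.List.slice M (some 1) none).foldl (pvSelStep step) ([m0], 0)).1

-- ===== PRECONDITION & SPEC =====
-- Pre_ excludes only the empty list, on which both A and B raise IndexError.
def Pre_getMonthLastDay (dates : List String) (step : Int) : Prop := dates ≠ []
instance (dates : List String) (step : Int) : Decidable (Pre_getMonthLastDay dates step) := by unfold Pre_getMonthLastDay; infer_instance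
def pvWitness_getMonthLastDay : List String × Int := (["20200131", "20200210", "20200215", "20200310"], 1)

def Spec_getMonthLastDay (dates : List String) (step : Int) (out : List String) : Prop := out = getMonthLastDay_alt dates step
instance (dates : List String) (step : Int) (out : List String) : Decidable (Spec_getMonthLastDay dates step out) := by unfold Spec_getMonthLastDay; infer_instance

-- ===== CLAIM (what is proved, stated in full; the proofs are below) =====
def Claim_equal_getMonthLastDay : Prop := ∀ (dates : List String) (step : Int), Dom_getMonthLastDay dates step → Pre_getMonthLastDay dates step → Spec_getMonthLastDay dates step (getMonthLastDay dates step)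

-- ===== LEMMAS AND PROOFS =====

-- B's selection pass as a function of the month table
def pvSelect (step : Int) (M : List String) : List String × Int :=
  match M with
  | [] => ([], 0)
  | m :: t => t.foldl (pvSelStep step) ([m], 0)

theorem pv_getLastD_indep (l : List String) (h : l ≠ []) (a b : String) :
    l.getLastD a = l.getLastD b := by
  cases l with
  | nil => exact absurd rfl h
  | cons c r => rw [List.getLastD_cons, List.getLastD_cons]

theorem pv_getLastD_cons_ne (m : String) (l : List String) (h : l ≠ []) :
    (m :: l).getLastD "" = l.getLastD "" := by
  rw [List.getLastD_cons]
  exact pv_getLastD_indep l h m ""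

theorem pv_getLastD_append (F l : List String) (h : l ≠ []) (d : String) :
    (F ++ l).getLastD d = l.getLastD d := by
  induction F generalizing d with
  | nil => rfl
  | cons a F ih => rw [List.cons_append, List.getLastD_cons, ih a, pv_getLastD_indep l h a d]

theorem pv_selStep_last (step : Int) (σ : List String × Int) (m d : String) :
    ((pvSelStep step σ m).1).getLastD d = m := by
  unfold pvSelStep
  split <;> simp

theorem pv_selStep_replace (step : Int) (σ : List String × Int) (m m' : String) :
    pvSelStep step σ m' = ((pvSelStep step σ m).1.dropLast ++ [m'], (pvSelStep step σ m).2) := by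
  unfold pvSelStep
  split <;> simp

theorem pv_fold_last (step : Int) (t : List String) (ht : t ≠ []) (σ : List String × Int) :
    ((t.foldl (pvSelStep step) σ).1).getLastD "" = t.getLastD "" := by
  induction t generalizing σ with
  | nil => exact absurd rfl ht
  | cons m t' ih =>
    cases t' with
    | nil =>
      rw [List.foldl_cons, List.foldl_nil]
      exact pv_selStep_last step σ m ""
    | cons c r =>
      rw [List.foldl_cons, ih (by simp) (pvSelStep step σ m)]
      exact (pv_getLastD_cons_ne m (c :: r) (by simp)).symm

theorem pv_select_last (step : Int) (M : List String) (hM : M ≠ []) :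
    ((pvSelect step M).1).getLastD "" = M.getLastD "" := by
  cases M with
  | nil => exact absurd rfl hM
  | cons m t =>
    cases t with
    | nil => rfl
    | cons c r =>
      show (((c :: r).foldl (pvSelStep step) ([m], 0)).1).getLastD "" = (m :: c :: r).getLastD ""
      rw [pv_fold_last step (c :: r) (by simp)]
      exact (pv_getLastD_cons_ne m (c :: r) (by simp)).symm

theorem pv_select_snoc (step : Int) (M : List String) (hM : M ≠ []) (x : String) :
    pvSelect step (M ++ [x]) = pvSelStep step (pvSelect step M) x := by
  cases M with
  | nil => exact absurd rfl hM
  | cons m t => simp [pvSelect, List.foldl_append]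

theorem pv_select_replace (step : Int) (M : List String) (hM : M ≠ []) (x : String) :
    pvSelect step (M.dropLast ++ [x])
      = ((pvSelect step M).1.dropLast ++ [x], (pvSelect step M).2) := by
  rcases List.eq_nil_or_concat M with rfl | ⟨M', m, rfl⟩
  · exact absurd rfl hM
  · simp only [List.concat_eq_append]
    rcases List.eq_nil_or_concat M' with rfl | ⟨N, c, rfl⟩
    · simp [pvSelect]
    · simp only [List.concat_eq_append]
      have hM' : N ++ [c] ≠ [] := by simp
      rw [List.dropLast_concat, pv_select_snoc step (N ++ [c]) hM' x,
          pv_select_snoc step (N ++ [c]) hM' m, pv_selStep_replace step _ m x]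

theorem pv_zipM_one (a : String) : pvZipM [a] = [a] := by
  simp [pvZipM, PySem.List.slice_from_one, PySem.List.slice_from_neg_one]

theorem pv_zipM_cons2 (a b : String) (t : List String) :
    pvZipM (a :: b :: t)
      = (if pvMonth b != pvMonth a then [a] else []) ++ pvZipM (b :: t) := by
  simp only [pvZipM, PySem.List.slice_from_one, PySem.List.slice_from_neg_one, List.tail_cons,
    List.zip_cons_cons, List.filter_cons]
  have hlen : (a :: b :: t).length - 1 = (b :: t).length := by simp
  rw [hlen]
  have hdrop : (a :: b :: t).drop (b :: t).length = (b :: t).drop ((b :: t).length - 1) := by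
    cases t with
    | nil => simp
    | cons c r => simp [List.drop_succ_cons]
  rw [hdrop]
  split <;> simp

theorem pv_zipM_ne_nil (ds : List String) (h : ds ≠ []) : pvZipM ds ≠ [] := by
  cases ds with
  | nil => exact absurd rfl h
  | cons a t =>
    cases t with
    | nil => simp [pv_zipM_one]
    | cons b r => rw [pv_zipM_cons2]; simp [pv_zipM_ne_nil (b :: r) (by simp)]

theorem pv_zipM_last (ds : List String) (h : ds ≠ []) :
    (pvZipM ds).getLastD "" = ds.getLastD "" := by
  cases ds with
  | nil => exact absurd rfl h
  | cons a t =>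
    cases t with
    | nil => simp [pv_zipM_one]
    | cons b r =>
      rw [pv_zipM_cons2, pv_getLastD_append _ _ (pv_zipM_ne_nil (b :: r) (by simp)) "",
          pv_zipM_last (b :: r) (by simp)]
      exact (pv_getLastD_cons_ne a (b :: r) (by simp)).symm

theorem pv_zipM_snoc (a : String) (t : List String) (x : String) :
    pvZipM ((a :: t) ++ [x])
      = if pvMonth x == pvMonth ((a :: t).getLastD "")
        then (pvZipM (a :: t)).dropLast ++ [x]
        else pvZipM (a :: t) ++ [x] := by
  induction t generalizing a with
  | nil =>
    rw [show ((a :: ([] : List String)) ++ [x]) = [a, x] from rfl, pv_zipM_cons2, pv_zipM_one,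
        pv_zipM_one, show (([a] : List String)).getLastD "" = a from rfl]
    rcases h : pvMonth x == pvMonth a <;> simp [bne, h]
  | cons b r ih =>
    have hgl : (a :: b :: r).getLastD "" = (b :: r).getLastD "" := by
      rw [List.getLastD_cons]
      exact pv_getLastD_indep (b :: r) (by simp) a ""
    rw [show ((a :: b :: r) ++ [x]) = a :: b :: (r ++ [x]) from rfl, pv_zipM_cons2 a b (r ++ [x]),
        show (b :: (r ++ [x])) = (b :: r) ++ [x] from rfl, ih b, pv_zipM_cons2 a b r, hgl]
    have hne := pv_zipM_ne_nil (b :: r) (by simp)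
    cases hC : pvMonth x == pvMonth ((b :: r).getLastD "") with
    | true =>
      rw [List.dropLast_append_of_ne_nil hne]
      simp [List.append_assoc]
    | false => simp [List.append_assoc]

theorem pv_stepA_of_ne (step : Int) (st : List String × Int) (x : String)
    (h : (pvMonth x == pvMonth (st.1.getLastD "")) = false) :
    pvStepA step st x = pvSelStep step st x := by
  unfold pvStepA pvSelStep
  rw [h]
  simp

-- A's fused scan over the sorted list equals B's selection pass over B's month table.
theorem pv_main (step : Int) (ds : List String) (h : ds ≠ []) :
    ds.tail.foldl (pvStepA step) ([ds.headD ""], 0) = pvSelect step (pvZipM ds) := by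
  induction ds using List.reverseRecOn with
  | nil => exact absurd rfl h
  | append_singleton ds x ih =>
    cases ds with
    | nil => simp [pvSelect, pv_zipM_one]
    | cons a t =>
      have hds : (a :: t) ≠ [] := by simp
      have hMne := pv_zipM_ne_nil (a :: t) hds
      have hih := ih hds
      rw [show (a :: t).tail = t from rfl, show (a :: t).headD "" = a from rfl] at hih
      rw [show ((a :: t) ++ [x]).tail = t ++ [x] from rfl,
          show ((a :: t) ++ [x]).headD "" = a from rfl,
          List.foldl_append, hih]
      have hlast : (pvSelect step (pvZipM (a :: t))).1.getLastD "" = (a :: t).getLastD "" := by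
        rw [pv_select_last step _ hMne, pv_zipM_last _ hds]
      rw [List.foldl_cons, List.foldl_nil, pv_zipM_snoc a t x]
      cases hm : (pvMonth x == pvMonth ((a :: t).getLastD "")) with
      | true =>
        rw [if_pos rfl, pv_select_replace step _ hMne x]
        unfold pvStepA
        rw [hlast, hm]
        simp
      | false =>
        rw [if_neg (by simp), pv_select_snoc step _ hMne x]
        exact pv_stepA_of_ne step _ x (by rw [hlast]; exact hm)

theorem pv_pyGet_zero (a : String) (l : List String) :
    PySem.List.pyGet? (a :: l) 0 = some a := by
  simp [PySem.List.pyGet?, PySem.List.pyIdx?]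

theorem pv_first_step (step : Int) (d0 : String) :
    pvStepA step ([d0], 0) d0 = ([d0], 0) := by
  simp [pvStepA]

-- ===== VERDICT (by name: the statement is the Claim_ definition above) =====
theorem getMonthLastDay_spec : Claim_equal_getMonthLastDay := by
  intro dates step _ hpre
  unfold Spec_getMonthLastDay
  have hds : PySem.List.sorted dates (fun x => x) false ≠ [] := by
    simpa [PySem.List.sorted_eq_nil_iff] using hpre
  cases hsort : PySem.List.sorted dates (fun x => x) false with
  | nil => exact absurd hsort hds
  | cons d0 t =>
    have hA : getMonthLastDay dates step = ((d0 :: t).foldl (pvStepA step) ([d0], 0)).1 := by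
      simp only [getMonthLastDay, hsort, pv_pyGet_zero]
    cases hM : pvZipM (d0 :: t) with
    | nil => exact absurd hM (pv_zipM_ne_nil _ (by simp))
    | cons m0 M' =>
      have hB : getMonthLastDay_alt dates step = (M'.foldl (pvSelStep step) ([m0], 0)).1 := by
        simp only [getMonthLastDay_alt, hsort, hM, pv_pyGet_zero, PySem.List.slice_from_one,
          List.tail_cons]
      have hmain := pv_main step (d0 :: t) (by simp)
      rw [show (d0 :: t).tail = t from rfl, show (d0 :: t).headD "" = d0 from rfl] at hmain
      rw [hA, hB, List.foldl_cons, pv_first_step, hmain, hM]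
      rfl
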